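-- pv_equiv track=rewrite | github.com/Tomson601/kni_root | generate_blog.py | parse_metadata_and_content
-- ===== SOURCE A (Python) =====
-- def parse_metadata_and_content(md_text):
--     lines = md_text.splitlines()
--     metadata = {}
--     content_lines = []
--     reading_meta = True
--
--     for line in lines:
--         if reading_meta and line.startswith('---'):
--             continue
--         elif reading_meta and ':' in line:
--             key, value = line.split(':', 1)
--             metadata[key.strip()] = value.strip().strip('"')
--         else:
--             reading_meta = False
--             content_lines.append(line)
--
--     content = '\n'.join(content_lines)
--     return metadata, content
-- ===== SOURCE B (Python) =====
-- def parse_metadata_and_content(md_text):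
--     lines = md_text.splitlines()
--     i = 0
--     while i < len(lines) and (lines[i].startswith('---') or ':' in lines[i]):
--         i += 1
--     metadata = {}
--     for line in lines[:i]:
--         if not line.startswith('---'):
--             key, value = line.split(':', 1)
--             metadata[key.strip()] = value.strip().strip('"')
--     content = '\n'.join(lines[i:])
--     return metadata, content
-- ===== Notes on version B (the rewrite author's own statement) =====
-- stated objective: alternative
-- what changed: Replaces the flag-driven single pass with a boundary search (first line that neither starts with '---' nor contains ':'), then builds the metadata from the prefix and joins the suffix as content.
import Mathlib
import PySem

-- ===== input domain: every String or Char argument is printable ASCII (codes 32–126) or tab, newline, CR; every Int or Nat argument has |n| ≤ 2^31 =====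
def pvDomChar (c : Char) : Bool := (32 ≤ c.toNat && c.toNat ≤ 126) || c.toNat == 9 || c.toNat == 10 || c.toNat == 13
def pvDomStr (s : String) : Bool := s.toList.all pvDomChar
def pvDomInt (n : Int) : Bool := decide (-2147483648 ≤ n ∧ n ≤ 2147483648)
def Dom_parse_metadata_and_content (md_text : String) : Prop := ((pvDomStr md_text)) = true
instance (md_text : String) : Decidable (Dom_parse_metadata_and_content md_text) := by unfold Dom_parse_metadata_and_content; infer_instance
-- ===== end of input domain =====

-- B replaces A's flag-driven single pass by a boundary search followed by two separate passes
-- (metadata from the prefix, content = join of the suffix); same cost, different decomposition.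

-- ===== PORT A =====
-- shared per-line metadata entry: key, value = line.split(':', 1); (key.strip(), value.strip().strip('"')).
-- ':' is in the line at every call site, so split(':',1) yields exactly two parts and tuple unpacking
-- is parts[0], parts[1]; the getD defaults are unreachable.
def pvMetaEntry (l : String) : String × String :=
  let parts := (PySem.Str.splitMax? l ":" 1).getD []
  (PySem.Str.strip (parts.getD 0 ""),
   PySem.Str.stripChars (PySem.Str.strip (parts.getD 1 "")) "\"")

-- A's loop: state (metadata, content_lines, reading_meta), branches in A's order
def pvALoop (lines : List String) (md : PySem.Dict String String)
    (cl : List String) (rm : Bool) : PySem.Dict String String × List String :=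
  match lines with
  | [] => (md, cl)
  | l :: ls =>
    if rm && PySem.Str.startswith l "---" then
      pvALoop ls md cl rm
    else if rm && PySem.Str.isIn ":" l then
      let e := pvMetaEntry l
      pvALoop ls (md.insert e.1 e.2) cl rm
    else
      pvALoop ls md (cl ++ [l]) false

def parse_metadata_and_content (md_text : String) : (List (String × String)) × String :=
  let r := pvALoop (PySem.Str.splitlines md_text) PySem.Dict.empty [] true
  (r.1.items, PySem.Str.join "\n" r.2)

-- ===== PORT B =====
-- boundary test: the line still belongs to the metadata block
def pvIsMeta (l : String) : Bool := PySem.Str.startswith l "---" || PySem.Str.isIn ":" l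

-- B's metadata pass over lines[:i]
def pvBMeta (lines : List String) (md : PySem.Dict String String) : PySem.Dict String String :=
  match lines with
  | [] => md
  | l :: ls =>
    if PySem.Str.startswith l "---" then pvBMeta ls md
    else
      let e := pvMetaEntry l
      pvBMeta ls (md.insert e.1 e.2)

def parse_metadata_and_content_alt (md_text : String) : (List (String × String)) × String :=
  let lines := PySem.Str.splitlines md_text
  -- i = first index with ¬ pvIsMeta; lines[:i] = takeWhile, lines[i:] = dropWhile
  ((pvBMeta (lines.takeWhile pvIsMeta) PySem.Dict.empty).items,
   PySem.Str.join "\n" (lines.dropWhile pvIsMeta))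

-- ===== PRECONDITION & SPEC =====
def Spec_parse_metadata_and_content (md_text : String) (out : (List (String × String)) × String) : Prop := out = parse_metadata_and_content_alt md_text
instance (md_text : String) (out : (List (String × String)) × String) : Decidable (Spec_parse_metadata_and_content md_text out) := by unfold Spec_parse_metadata_and_content; infer_instance

-- ===== CLAIM (what is proved, stated in full; the proofs are below) =====
def Claim_equal_parse_metadata_and_content : Prop := ∀ (md_text : String), Dom_parse_metadata_and_content md_text → Spec_parse_metadata_and_content md_text (parse_metadata_and_content md_text)

-- ===== LEMMAS AND PROOFS =====

-- once reading_meta is False, A only appends the remaining lines to content_lines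
lemma pvALoop_false (lines : List String) (md : PySem.Dict String String) (cl : List String) :
    pvALoop lines md cl false = (md, cl ++ lines) := by
  induction lines generalizing cl with
  | nil => simp [pvALoop]
  | cons l ls ih =>
    simp only [pvALoop, Bool.false_and, Bool.false_eq_true, if_false, ih]
    simp

-- A's loop in the reading state equals B's decomposition
lemma pvALoop_true (lines : List String) (md : PySem.Dict String String) (cl : List String) :
    pvALoop lines md cl true =
      (pvBMeta (lines.takeWhile pvIsMeta) md, cl ++ lines.dropWhile pvIsMeta) := by
  induction lines generalizing md cl with
  | nil => simp [pvALoop, pvBMeta]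
  | cons l ls ih =>
    cases h1 : PySem.Str.startswith l "---" with
    | true =>
      simp only [pvALoop, pvIsMeta, List.takeWhile_cons, List.dropWhile_cons, h1,
        Bool.true_and, Bool.true_or, if_true, ih, pvBMeta]
    | false =>
      cases h2 : PySem.Str.isIn ":" l with
      | true =>
        simp only [pvALoop, pvIsMeta, List.takeWhile_cons, List.dropWhile_cons, h1, h2,
          Bool.true_and, Bool.false_or, if_true, Bool.false_eq_true, if_false, ih, pvBMeta]
      | false =>
        simp only [pvALoop, pvIsMeta, List.takeWhile_cons, List.dropWhile_cons, h1, h2,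
          Bool.true_and, Bool.false_or, Bool.false_eq_true, if_false, pvALoop_false]
        simp [pvBMeta]

-- ===== VERDICT (by name: the statement is the Claim_ definition above) =====
theorem parse_metadata_and_content_spec : Claim_equal_parse_metadata_and_content := by
  intro md_text _
  unfold Spec_parse_metadata_and_content parse_metadata_and_content parse_metadata_and_content_alt
  simp [pvALoop_true]
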